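-- pv_equiv track=rewrite | github.com/kaust-cs249-2020/fernando-zhapa | chapter9/_9101_BWMatching.py | k_occurrences
-- ===== SOURCE A (Python) =====
-- def k_occurrences(column):
--
--     column = [char for char in column]
--     dict = {}
--
--     for i in range(len(column)):
--         if not column[i] in dict:
--             dict[column[i]] = 1
--             column[i] = ( dict[column[i]], column[i])
--
--         else:
--             dict[column[i]] += 1
--             column[i] = ( dict[column[i]], column[i])
--
--     return column
-- ===== SOURCE B (Python) =====
-- def k_occurrences(column):
--     # Stage 1: index table — for each distinct character, the list of positions
--     # where it appears, in appearance order.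
--     positions = {}
--     for i, ch in enumerate(column):
--         positions.setdefault(ch, []).append(i)
--     # Stage 2: scatter — pre-size the output and write (rank, char) at each
--     # recorded position (every slot is overwritten, the placeholder never survives).
--     result = [(0, '')] * len(column)
--     for ch, idxs in positions.items():
--         for rank, pos in enumerate(idxs, 1):
--             result[pos] = (rank, ch)
--     return result
-- ===== Notes on version B (the rewrite author's own statement) =====
-- stated objective: alternative
-- what changed: Replaces A's single stateful left-to-right pass (running-count dict, list mutated in place) by a two-stage scatter: one pass builds a char-to-positions index table, then a pre-sized output list is filled by writing (rank, char) at each recorded position while iterating the table.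
import Mathlib
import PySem

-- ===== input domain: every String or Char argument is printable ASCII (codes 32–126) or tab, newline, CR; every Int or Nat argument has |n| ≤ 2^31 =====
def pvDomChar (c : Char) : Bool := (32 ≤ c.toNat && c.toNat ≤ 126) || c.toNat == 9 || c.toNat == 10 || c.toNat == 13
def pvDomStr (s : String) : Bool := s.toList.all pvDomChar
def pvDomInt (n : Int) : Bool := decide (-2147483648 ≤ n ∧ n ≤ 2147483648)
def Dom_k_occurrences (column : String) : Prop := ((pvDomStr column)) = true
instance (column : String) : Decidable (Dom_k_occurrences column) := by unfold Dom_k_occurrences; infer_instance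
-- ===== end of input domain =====

-- B replaces A's single stateful running-count pass by a two-stage scatter: build a
-- char→positions index table, then fill a pre-sized output by writing (rank, char)
-- at each recorded position (objective: alternative).

-- ===== PORT A =====
-- A walks the characters left to right keeping a dict of counts seen so far,
-- replacing each character by (its updated count, the character).
def kOccGoA (d : PySem.Dict Char Int) : List Char → List (Int × String)
  | [] => []
  | c :: rest =>
    if (d.contains c) = false then
      let d' := d.insert c 1
      (d'.getD c 0, String.ofList [c]) :: kOccGoA d' rest
    else
      let d' := d.insert c (d.getD c 0 + 1)
      (d'.getD c 0, String.ofList [c]) :: kOccGoA d' rest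

def k_occurrences (column : String) : List (Int × String) :=
  kOccGoA PySem.Dict.empty column.toList

-- ===== PORT B =====
-- Stage 1: for i, ch in enumerate(column): positions.setdefault(ch, []).append(i)
-- Net effect on the dict: key ch (inserted at the end if absent, like modify) maps to its
-- old list (or []) with i appended — exactly PySem.Dict.modify ch [] (· ++ [i]).
def kOccBuildPos (xs : List Char) : PySem.Dict Char (List Int) :=
  (PySem.List.enumerate xs 0).foldl (fun d p => d.modify p.2 [] (· ++ [p.1])) PySem.Dict.empty

-- Stage 2 inner loop: for rank, pos in enumerate(idxs, 1): result[pos] = (rank, ch)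
-- (every recorded position is in range, so pySetD is exact for result[pos] = …).
def kOccScatter (r : List (Int × String)) (q : Char × List Int) : List (Int × String) :=
  (PySem.List.enumerate q.2 1).foldl (fun r p => PySem.List.pySetD r p.2 (p.1, String.ofList [q.1])) r

def k_occurrences_alt (column : String) : List (Int × String) :=
  ((kOccBuildPos column.toList).items).foldl kOccScatter
    (List.replicate column.toList.length ((0 : Int), ""))

-- ===== PRECONDITION & SPEC =====
def Spec_k_occurrences (column : String) (out : List (Int × String)) : Prop := out = k_occurrences_alt column
instance (column : String) (out : List (Int × String)) : Decidable (Spec_k_occurrences column out) := by unfold Spec_k_occurrences; infer_instance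

-- ===== CLAIM (what is proved, stated in full; the proofs are below) =====
def Claim_equal_k_occurrences : Prop := ∀ (column : String), Dom_k_occurrences column → Spec_k_occurrences column (k_occurrences column)

-- ===== LEMMAS AND PROOFS =====

-- Reference: annotate each char with its count in the prefix ending at it.
def kOccRef (pre : List Char) : List Char → List (Int × String)
  | [] => []
  | c :: rest => (((pre ++ [c]).count c : Int), String.ofList [c]) :: kOccRef (pre ++ [c]) rest

-- The positions recorded for character c: indices (as Int) of its occurrences, in order.
def occIdx (c : Char) (xs : List Char) : List Int :=
  ((PySem.List.enumerate xs 0).filter (fun p => p.2 == c)).map (·.1)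

-- ---- A-side: the running-count pass is kOccRef ----
lemma kOccGoA_eq_ref (xs : List Char) : ∀ (d : PySem.Dict Char Int) (pre : List Char),
    (∀ c : Char, d.contains c = decide (0 < pre.count c)) →
    (∀ c : Char, d.getD c 0 = (pre.count c : Int)) →
    kOccGoA d xs = kOccRef pre xs := by
  induction xs with
  | nil => intro d pre _ _; simp [kOccGoA, kOccRef]
  | cons c rest ih =>
    intro d pre hcont hval
    have hcnt : ∀ c' : Char, (pre ++ [c]).count c'
        = pre.count c' + (if c' = c then 1 else 0) := by
      intro c'
      by_cases hc : c' = c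
      · subst hc; simp [List.count_append]
      · have hc2 : ¬ c = c' := fun h => hc h.symm
        simp [List.count_append, hc, hc2]
    have hcont' : ∀ v, ∀ c' : Char, (d.insert c v).contains c'
        = decide (0 < (pre ++ [c]).count c') := by
      intro v c'
      rw [PySem.Dict.contains_insert, hcont c', hcnt c']
      by_cases hc : c' = c
      · subst hc; simp
      · simp [hc]
    by_cases h0 : pre.count c = 0
    · have hcc : d.contains c = false := by rw [hcont c]; simp [h0]
      have hval' : ∀ c' : Char, (d.insert c 1).getD c' 0 = ((pre ++ [c]).count c' : Int) := by
        intro c'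
        rw [PySem.Dict.getD_insert, hcnt c']
        by_cases hc : c' = c
        · subst hc; simp [h0]
        · simp [hc, hval c']
      have hhead : (d.insert c 1).getD c 0 = (((pre ++ [c]).count c : Int)) := hval' c
      simp only [kOccGoA, hcc]
      simp only [kOccRef]
      rw [if_pos trivial, hhead, ih _ _ (hcont' 1) hval']
    · have hcc : d.contains c = true := by rw [hcont c]; simp [Nat.pos_of_ne_zero h0]
      have hval' : ∀ c' : Char, (d.insert c (d.getD c 0 + 1)).getD c' 0
          = ((pre ++ [c]).count c' : Int) := by
        intro c'
        rw [PySem.Dict.getD_insert, hcnt c']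
        by_cases hc : c' = c
        · subst hc; simp [hval]
        · simp [hc, hval c']
      have hhead : (d.insert c (d.getD c 0 + 1)).getD c 0 = (((pre ++ [c]).count c : Int)) :=
        hval' c
      simp only [kOccGoA, hcc]
      simp only [kOccRef]
      rw [if_neg (by simp), hhead, ih _ _ (hcont' _) hval']

-- ---- kOccRef, pointwise ----
lemma kOccRef_length (xs : List Char) : ∀ pre, (kOccRef pre xs).length = xs.length := by
  induction xs with
  | nil => intro pre; simp [kOccRef]
  | cons c rest ih => intro pre; simp [kOccRef, ih]

lemma kOccRef_getElem? (xs : List Char) : ∀ pre (j : Nat) (c : Char), xs[j]? = some c →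
    (kOccRef pre xs)[j]? = some (((pre ++ xs.take (j + 1)).count c : Int), String.ofList [c]) := by
  induction xs with
  | nil => intro pre j c h; simp at h
  | cons d rest ih =>
    intro pre j c h
    cases j with
    | zero => simp at h; subst h; simp [kOccRef]
    | succ j =>
      simp only [List.getElem?_cons_succ] at h
      simp only [kOccRef, List.getElem?_cons_succ]
      rw [ih (pre ++ [d]) j c h]
      simp [List.take_succ_cons]

-- ---- the built dict ----
lemma buildPos_getD (xs : List Char) (c : Char) : (kOccBuildPos xs).getD c [] = occIdx c xs := by
  unfold kOccBuildPos occIdx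
  have h : (PySem.List.enumerate xs 0).foldl (fun d p => d.modify p.2 [] (· ++ [p.1])) PySem.Dict.empty
      = ((PySem.List.enumerate xs 0).map (fun p => (p.2, p.1))).foldl
          (fun d p => d.modify p.1 [] (· ++ [p.2])) PySem.Dict.empty := by
    rw [List.foldl_map]
  rw [h, PySem.Dict.getD_foldl_modify_append]
  rw [List.filter_map, List.map_map]
  rfl

lemma buildPos_keys (xs : List Char) : (kOccBuildPos xs).keys = PySem.Set.ofList xs := by
  unfold kOccBuildPos
  rw [PySem.Dict.keys_foldl_modify_key]
  simp [PySem.List.map_snd_enumerate, PySem.Set.update_nil_left]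

lemma buildPos_nodup (xs : List Char) : (kOccBuildPos xs).keys.Nodup := by
  unfold kOccBuildPos
  exact PySem.Dict.nodup_keys_foldl_modify_key _ _ _ _ _ (by simp)

lemma buildPos_items (xs : List Char) :
    (kOccBuildPos xs).items = (PySem.Set.ofList xs).map (fun c => (c, occIdx c xs)) := by
  rw [PySem.Dict.items_eq_map_keys _ (buildPos_nodup xs) [], buildPos_keys]
  apply List.map_congr_left
  intro c _
  rw [buildPos_getD]

-- ---- occIdx ----
lemma occIdx_append_singleton (c d : Char) (xs : List Char) :
    occIdx c (xs ++ [d]) = occIdx c xs ++ (if d = c then [(xs.length : Int)] else []) := by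
  unfold occIdx
  rw [PySem.List.enumerate_append, List.filter_append, List.map_append]
  congr 1
  simp [PySem.List.enumerate_cons, PySem.List.enumerate_nil]
  by_cases h : d = c <;> simp [h]

lemma occIdx_length (c : Char) (xs : List Char) : (occIdx c xs).length = xs.count c := by
  induction xs using List.reverseRecOn with
  | nil => simp [occIdx, PySem.List.enumerate_nil]
  | append_singleton ys d ih =>
    rw [occIdx_append_singleton]
    by_cases h : d = c <;> simp [h, ih, List.count_append]

-- ---- scatter of one character ----
lemma scatter_spec (c : Char) (xs : List Char) (r : List (Int × String)) (hr : xs.length ≤ r.length) :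
    (kOccScatter r (c, occIdx c xs)).length = r.length ∧
    ∀ j : Nat, (kOccScatter r (c, occIdx c xs))[j]? =
      if j < xs.length ∧ xs[j]? = some c
      then some (((xs.take (j + 1)).count c : Int), String.ofList [c]) else r[j]? := by
  induction xs using List.reverseRecOn with
  | nil =>
    constructor
    · simp [kOccScatter, occIdx, PySem.List.enumerate_nil]
    · intro j; simp [kOccScatter, occIdx, PySem.List.enumerate_nil]
  | append_singleton ys d ih =>
    have hys : ys.length ≤ r.length := by simp at hr; omega
    obtain ⟨ihlen, ihget⟩ := ih hys
    rw [occIdx_append_singleton]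
    by_cases hd : d = c
    · subst hd
      rw [if_pos rfl]
      have hexp : kOccScatter r (d, occIdx d ys ++ [(ys.length : Int)])
          = PySem.List.pySetD (kOccScatter r (d, occIdx d ys)) (ys.length : Int)
              ((1 + (occIdx d ys).length : Int), String.ofList [d]) := by
        unfold kOccScatter
        rw [PySem.List.enumerate_append, List.foldl_append]
        simp [PySem.List.enumerate_cons, PySem.List.enumerate_nil]
      rw [hexp, occIdx_length, PySem.List.pySetD_natCast]
      have hlen : (kOccScatter r (d, occIdx d ys)).length = r.length := ihlen
      constructor
      · simp [hlen]
      · intro j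
        by_cases hj : j = ys.length
        · subst hj
          rw [List.getElem?_set_self (by rw [ihlen]; simp at hr; omega)]
          have hcond : ys.length < (ys ++ [d]).length ∧ (ys ++ [d])[ys.length]? = some d := by
            constructor
            · simp
            · simp
          rw [if_pos hcond]
          have htake : (ys ++ [d]).take (ys.length + 1) = ys ++ [d] := by
            apply List.take_of_length_le; simp
          rw [htake]
          simp [List.count_append]
          omega
        · rw [List.getElem?_set_ne (by omega)]
          rw [ihget j]
          have hc1 : (j < (ys ++ [d]).length ∧ (ys ++ [d])[j]? = some d)
              ↔ (j < ys.length ∧ ys[j]? = some d) := by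
            constructor
            · rintro ⟨h1, h2⟩
              have hjlt : j < ys.length := by simp at h1; omega
              rw [List.getElem?_append_left hjlt] at h2
              exact ⟨hjlt, h2⟩
            · rintro ⟨h1, h2⟩
              exact ⟨by simp; omega, by rw [List.getElem?_append_left h1]; exact h2⟩
          rw [if_congr hc1 rfl rfl]
          by_cases hcnd : j < ys.length ∧ ys[j]? = some d
          · rw [if_pos hcnd, if_pos hcnd]
            have : (ys ++ [d]).take (j + 1) = ys.take (j + 1) :=
              List.take_append_of_le_length (by omega)
            rw [this]
          · rw [if_neg hcnd, if_neg hcnd]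
    · simp only [if_neg hd, List.append_nil]
      constructor
      · exact ihlen
      · intro j
        rw [ihget j]
        have hc1 : (j < (ys ++ [d]).length ∧ (ys ++ [d])[j]? = some c)
            ↔ (j < ys.length ∧ ys[j]? = some c) := by
          constructor
          · rintro ⟨h1, h2⟩
            by_cases hjlt : j < ys.length
            · rw [List.getElem?_append_left hjlt] at h2
              exact ⟨hjlt, h2⟩
            · have hj : j = ys.length := by simp at h1; omega
              subst hj
              simp at h2
              exact absurd h2 hd
          · rintro ⟨h1, h2⟩
            exact ⟨by simp; omega, by rw [List.getElem?_append_left h1]; exact h2⟩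
        rw [if_congr hc1 rfl rfl]
        by_cases hcnd : j < ys.length ∧ ys[j]? = some c
        · rw [if_pos hcnd, if_pos hcnd]
          have : (ys ++ [d]).take (j + 1) = ys.take (j + 1) :=
            List.take_append_of_le_length (by omega)
          rw [this]
        · rw [if_neg hcnd, if_neg hcnd]

-- ---- outer fold over the table's keys ----
lemma fold_scatter (xs : List Char) (ks : List Char) :
    ((ks.foldl (fun r c => kOccScatter r (c, occIdx c xs))
        (List.replicate xs.length ((0 : Int), ""))).length = xs.length) ∧
    ∀ (j : Nat) (c : Char), xs[j]? = some c → c ∈ ks →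
      (ks.foldl (fun r c => kOccScatter r (c, occIdx c xs))
        (List.replicate xs.length ((0 : Int), "")))[j]? =
        some (((xs.take (j + 1)).count c : Int), String.ofList [c]) := by
  induction ks using List.reverseRecOn with
  | nil => simp
  | append_singleton ks c0 ih =>
    obtain ⟨ihlen, ihget⟩ := ih
    rw [List.foldl_append, List.foldl_cons, List.foldl_nil]
    obtain ⟨slen, sget⟩ := scatter_spec c0 xs _ (le_of_eq ihlen.symm)
    constructor
    · rw [slen, ihlen]
    · intro j c h hmem
      have hj : j < xs.length := (List.getElem?_eq_some_iff.mp h).choose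
      rw [sget j]
      by_cases hc : c = c0
      · subst hc
        rw [if_pos ⟨hj, h⟩]
      · rw [if_neg (by rintro ⟨-, h2⟩; rw [h] at h2; exact hc (Option.some.inj h2))]
        exact ihget j c h (by simp at hmem; tauto)

lemma alt_eq_ref (xs : List Char) :
    ((kOccBuildPos xs).items).foldl kOccScatter (List.replicate xs.length ((0 : Int), ""))
      = kOccRef [] xs := by
  rw [buildPos_items, List.foldl_map]
  obtain ⟨flen, fget⟩ := fold_scatter xs (PySem.Set.ofList xs)
  apply List.ext_getElem?
  intro j
  by_cases hj : j < xs.length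
  · have h : xs[j]? = some xs[j] := List.getElem?_eq_some_iff.mpr ⟨hj, rfl⟩
    rw [fget j xs[j] h ((PySem.Set.mem_ofList _ _).mpr (xs.getElem_mem hj)),
      kOccRef_getElem? xs [] j xs[j] h, List.nil_append]
  · rw [List.getElem?_eq_none (by rw [flen]; omega),
      List.getElem?_eq_none (by rw [kOccRef_length]; omega)]

-- ===== VERDICT (by name: the statement is the Claim_ definition above) =====
theorem k_occurrences_spec : Claim_equal_k_occurrences := by
  intro column _
  unfold Spec_k_occurrences k_occurrences k_occurrences_alt
  rw [kOccGoA_eq_ref column.toList PySem.Dict.empty []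
        (by intro c; simp [PySem.Dict.contains_empty])
        (by intro c; simp [PySem.Dict.getD_empty])]
  exact (alt_eq_ref column.toList).symm
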